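-- pv_equiv track=rewrite | github.com/dawitys/Leetcode-Questions | 2266-count-number-of-texts/2266-count-number-of-texts.py | countTexts
-- ===== SOURCE A (Python) =====
-- def countTexts(A: str) -> int:
--     MOD = 10**9 + 7
--
--     dp = [0] * (len(A)+1)
--     dp[0] = 1
--     for i in range(1,len(A)+1):
--         dp[i] = dp[i-1]
--         if i>1 and A[i-1] == A[i-2]:
--             dp[i] += dp[i-2]
--
--             if i>2 and A[i-1] == A[i-3]:
--                 dp[i] += dp[i-3]
--
--                 if A[i-1] in '97' and i>3 and A[i-1] == A[i-4]:
--                     dp[i] += dp[i-4]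
--
--     return dp[-1] % MOD
-- ===== SOURCE B (Python) =====
-- def countTexts(A: str) -> int:
--     MOD = 10**9 + 7
--     res = 1
--     i = 0
--     n = len(A)
--     while i < n:
--         # find the end of the maximal run of A[i]
--         j = i + 1
--         while j < n and A[j] == A[i]:
--             j += 1
--         # number of ways to split a run of length j-i into key presses of
--         # size 1..4 (keys '7'/'9') or 1..3 (any other key): a tetra/tribonacci
--         w, x, y, z = 0, 0, 0, 1
--         four = A[i] in '97'
--         for _ in range(j - i):
--             w, x, y, z = x, y, z, ((w + x + y + z) if four else (x + y + z)) % MOD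
--         res = res * z % MOD
--         i = j
--     return res
-- ===== Notes on version B (the rewrite author's own statement) =====
-- stated objective: faster
-- what changed: Instead of one backward-looking dp array over all indices with a single final mod, B scans the string into maximal runs of equal characters, counts the tilings of each run with a rolling 4-tuple recurrence reduced mod 1e9+7 at every step, and multiplies the per-run counts modulo 1e9+7.
import Mathlib
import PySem

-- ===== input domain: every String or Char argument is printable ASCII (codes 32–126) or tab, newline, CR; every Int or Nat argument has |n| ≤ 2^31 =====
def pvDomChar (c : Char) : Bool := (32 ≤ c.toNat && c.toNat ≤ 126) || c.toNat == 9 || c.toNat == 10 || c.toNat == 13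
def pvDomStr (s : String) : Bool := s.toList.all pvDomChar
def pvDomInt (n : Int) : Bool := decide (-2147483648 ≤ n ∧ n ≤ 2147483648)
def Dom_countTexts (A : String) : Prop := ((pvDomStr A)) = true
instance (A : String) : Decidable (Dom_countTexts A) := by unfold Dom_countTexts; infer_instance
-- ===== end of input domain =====

-- B replaces A's whole-string dp array (exact bignum values, mod once at the end) by a run-factorized
-- scan with per-step modular reduction; measurably faster on large inputs (A's dp entries grow huge).


-- ===== PORT A =====
-- the body of A's 'for i in range(1, len(A)+1)' loop: dp[i] = dp[i-1]; nested 'if's add dp[i-2], dp[i-3], dp[i-4]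
def stepA (s : List Char) (dp : List Int) (i : Int) : List Int :=
  let v := PySem.List.pyGetD dp (i-1) 0
  let v :=
    if 1 < i ∧ PySem.List.pyGetD s (i-1) ' ' = PySem.List.pyGetD s (i-2) ' ' then
      let v := v + PySem.List.pyGetD dp (i-2) 0
      if 2 < i ∧ PySem.List.pyGetD s (i-1) ' ' = PySem.List.pyGetD s (i-3) ' ' then
        let v := v + PySem.List.pyGetD dp (i-3) 0
        if (PySem.List.pyGetD s (i-1) ' ' = '9' ∨ PySem.List.pyGetD s (i-1) ' ' = '7') ∧ 3 < i ∧
            PySem.List.pyGetD s (i-1) ' ' = PySem.List.pyGetD s (i-4) ' ' then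
          v + PySem.List.pyGetD dp (i-4) 0
        else v
      else v
    else v
  PySem.List.pySetD dp i v

def countTexts (A : String) : Int :=
  let s := A.toList
  let n := s.length
  -- dp = [0] * (len(A)+1); dp[0] = 1
  let dp0 : List Int := (List.replicate (n+1) (0:Int)).set 0 1
  let dp := (PySem.List.pyRange 1 ((n:Int)+1) 1).foldl (stepA s) dp0
  PySem.Int.mod (PySem.List.pyGetD dp (-1) 0) (10^9+7)

-- ===== PORT B =====
-- inner 'while j < n and A[j] == A[i]': length of the leading block of chars equal to c, and the remainder
def altSpan (c : Char) : List Char → Nat × List Char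
  | [] => (0, [])
  | x :: t => if x = c then let p := altSpan c t; (p.1 + 1, p.2) else (0, x :: t)

theorem altSpan_snd_length_le (c : Char) (t : List Char) : (altSpan c t).2.length ≤ t.length := by
  induction t with
  | nil => simp [altSpan]
  | cons x t ih => by_cases h : x = c <;> simp [altSpan, h] <;> omega

-- 'for _ in range(run): w, x, y, z = x, y, z, ((w+x+y+z) if four else (x+y+z)) % MOD'
def altTile (four : Bool) (run : Nat) : Int :=
  ((List.range run).foldl
    (fun (st : Int × Int × Int × Int) _ =>
      (st.2.1, st.2.2.1, st.2.2.2,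
        PySem.Int.mod (if four then st.1 + st.2.1 + st.2.2.1 + st.2.2.2
                       else st.2.1 + st.2.2.1 + st.2.2.2) (10^9+7)))
    (0, 0, 0, 1)).2.2.2

-- outer 'while i < n' loop, advancing one maximal run at a time
def altLoop : List Char → Int → Int
  | [], res => res
  | c :: t, res =>
    let p := altSpan c t
    let four : Bool := c = '9' ∨ c = '7'
    let z := altTile four (p.1 + 1)
    altLoop p.2 (PySem.Int.mod (res * z) (10^9+7))
termination_by s _ => s.length
decreasing_by
  have := altSpan_snd_length_le c t
  simp only [List.length_cons]; omega

def countTexts_alt (A : String) : Int := altLoop A.toList 1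

-- ===== PRECONDITION & SPEC =====
def Spec_countTexts (A : String) (out : Int) : Prop := out = countTexts_alt A
instance (A : String) (out : Int) : Decidable (Spec_countTexts A out) := by unfold Spec_countTexts; infer_instance

-- ===== CLAIM (what is proved, stated in full; the proofs are below) =====
def Claim_equal_countTexts : Prop := ∀ (A : String), Dom_countTexts A → Spec_countTexts A (countTexts A)


-- ===== LEMMAS AND PROOFS =====

-- pure characterization of A's dp: dA s i = dp[i]
def dA (s : List Char) : Nat → Int
  | 0 => 1
  | (m+1) =>
    let v := dA s m
    let v :=
      if 1 ≤ m ∧ s.getD m ' ' = s.getD (m-1) ' ' then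
        let v := v + dA s (m-1)
        if 2 ≤ m ∧ s.getD m ' ' = s.getD (m-2) ' ' then
          let v := v + dA s (m-2)
          if (s.getD m ' ' = '9' ∨ s.getD m ' ' = '7') ∧ 3 ≤ m ∧ s.getD m ' ' = s.getD (m-3) ' ' then
            v + dA s (m-3)
          else v
        else v
      else v
    v
termination_by m => m
decreasing_by all_goals omega

theorem dA_succ (s : List Char) (m : Nat) : dA s (m+1) = dA s m +
    (if 1 ≤ m ∧ s.getD m ' ' = s.getD (m-1) ' ' then
       dA s (m-1) +
       (if 2 ≤ m ∧ s.getD m ' ' = s.getD (m-2) ' ' then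
          dA s (m-2) +
          (if (s.getD m ' ' = '9' ∨ s.getD m ' ' = '7') ∧ 3 ≤ m ∧ s.getD m ' ' = s.getD (m-3) ' ' then
             dA s (m-3) else 0)
        else 0)
     else 0) := by
  rw [dA]
  split_ifs <;> ring

-- number of tilings of a run of length n with pieces of size ≤ 3 (≤ 4 if 'four')
def Fm (four : Bool) : Nat → Int
  | 0 => 1
  | 1 => 1
  | 2 => 2
  | 3 => 4
  | (n+4) => Fm four (n+3) + Fm four (n+2) + Fm four (n+1) + (if four then Fm four n else 0)

theorem Fm_succ (four : Bool) (n : Nat) : Fm four (n+1) =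
    Fm four n + (if 1 ≤ n then Fm four (n-1) else 0) + (if 2 ≤ n then Fm four (n-2) else 0) +
    (if four = true ∧ 3 ≤ n then Fm four (n-3) else 0) := by
  match n with
  | 0 => simp [Fm]
  | 1 => norm_num [Fm]
  | 2 => cases four <;> norm_num [Fm]
  | (n+3) =>
    show Fm four (n+4) = _
    rw [Fm]
    have h1 : n + 3 - 1 = n + 2 := by omega
    have h2 : n + 3 - 2 = n + 1 := by omega
    have h3 : n + 3 - 3 = n := by omega
    rw [h1, h2, h3]
    cases four <;> simp

def fourC (c : Char) : Bool := decide (c = '9' ∨ c = '7')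

-- reading inside / past a run
theorem getD_run_lt {k t : Nat} (c : Char) (r : List Char) (h : t < k) :
    (List.replicate k c ++ r).getD t ' ' = c := by
  have hlt : t < (List.replicate k c).length := by simpa using h
  rw [List.getD_eq_getElem?_getD, List.getElem?_append_left hlt]
  simp [List.getElem?_replicate, h]

theorem getD_run_add (k t : Nat) (c : Char) (r : List Char) :
    (List.replicate k c ++ r).getD (k+t) ' ' = r.getD t ' ' := by
  rw [List.getD_eq_getElem?_getD, List.getD_eq_getElem?_getD,
      List.getElem?_append_right (by simp)]
  simp

-- within the run, dA follows the Fm recurrence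
theorem R_run (c : Char) (k : Nat) (r : List Char) :
    ∀ j, j ≤ k → dA (List.replicate k c ++ r) j = Fm (fourC c) j := by
  intro j
  induction j using Nat.strong_induction_on with
  | _ j IH =>
    intro hj
    cases j with
    | zero => simp [dA, Fm]
    | succ j =>
      rw [dA_succ, Fm_succ]
      have g1 : ∀ t, t < k → (List.replicate k c ++ r).getD t ' ' = c :=
        fun t ht => getD_run_lt c r ht
      rw [g1 j (by omega), g1 (j-1) (by omega), g1 (j-2) (by omega), g1 (j-3) (by omega)]
      rw [IH j (by omega) (by omega), IH (j-1) (by omega) (by omega),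
          IH (j-2) (by omega) (by omega), IH (j-3) (by omega) (by omega)]
      simp only [and_true, fourC, decide_eq_true_eq]
      by_cases h1 : 1 ≤ j <;> by_cases h2 : 2 ≤ j <;> by_cases h3 : 3 ≤ j <;>
        by_cases hq : (c = '9' ∨ c = '7') <;> (try omega) <;>
        simp [h1, h2, h3, hq] <;> try ring

-- crossing the run boundary: dA factorizes over the leading run
theorem C_run (c : Char) (k : Nat) (r : List Char) (hk : 1 ≤ k)
    (hr : r.getD 0 ' ' ≠ c ∨ r = []) :
    ∀ i, i ≤ r.length → dA (List.replicate k c ++ r) (k + i) = Fm (fourC c) k * dA r i := by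
  intro i
  induction i using Nat.strong_induction_on with
  | _ i IH =>
    intro hi
    cases i with
    | zero =>
      rw [Nat.add_zero, R_run c k r k le_rfl]
      simp [dA]
    | succ i =>
      have hrne : r ≠ [] := by intro h; rw [h] at hi; simp at hi
      have hne : r.getD 0 ' ' ≠ c := hr.resolve_right hrne
      have gadd : ∀ t, (List.replicate k c ++ r).getD (k+t) ' ' = r.getD t ' ' :=
        fun t => getD_run_add k t c r
      have glt : ∀ t, t < k → (List.replicate k c ++ r).getD t ' ' = c :=
        fun t ht => getD_run_lt c r ht
      have hstep : k + (i+1) = (k+i) + 1 := by omega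
      rw [hstep, dA_succ, dA_succ]
      have e0 : (List.replicate k c ++ r).getD (k+i) ' ' = r.getD i ' ' := gadd i
      rw [e0]
      cases Nat.eq_zero_or_pos i with
      | inl h0 =>
        subst h0
        have eb : (List.replicate k c ++ r).getD (k+0-1) ' ' = c := by
          rw [show k + 0 - 1 = k - 1 from by omega]; exact glt (k-1) (by omega)
        rw [eb]
        conv_lhs => rw [if_neg (show ¬(1 ≤ k + 0 ∧ r.getD 0 ' ' = c) from by
          rintro ⟨_, h⟩; exact hne h)]
        conv_rhs => rw [if_neg (show ¬(1 ≤ 0 ∧ r.getD 0 ' ' = r.getD (0-1) ' ') from by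
          rintro ⟨h, _⟩; omega)]
        have h00 := IH 0 (by omega) (by omega)
        rw [Nat.add_zero] at h00
        rw [Nat.add_zero, h00]
        ring
      | inr h1 =>
        have e1 : (List.replicate k c ++ r).getD (k+i-1) ' ' = r.getD (i-1) ' ' := by
          rw [show k + i - 1 = k + (i-1) from by omega]; exact gadd (i-1)
        rw [e1]
        have v1 : dA (List.replicate k c ++ r) (k+i-1) = Fm (fourC c) k * dA r (i-1) := by
          rw [show k + i - 1 = k + (i-1) from by omega]; exact IH (i-1) (by omega) (by omega)
        have vi : dA (List.replicate k c ++ r) (k+i) = Fm (fourC c) k * dA r i :=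
          IH i (by omega) (by omega)
        by_cases hc1 : r.getD i ' ' = r.getD (i-1) ' '
        · conv_lhs => rw [if_pos (show 1 ≤ k + i ∧ r.getD i ' ' = r.getD (i-1) ' ' from
            ⟨by omega, hc1⟩)]
          conv_rhs => rw [if_pos (show 1 ≤ i ∧ r.getD i ' ' = r.getD (i-1) ' ' from ⟨h1, hc1⟩)]
          by_cases h2 : 2 ≤ i
          · have e2 : (List.replicate k c ++ r).getD (k+i-2) ' ' = r.getD (i-2) ' ' := by
              rw [show k + i - 2 = k + (i-2) from by omega]; exact gadd (i-2)
            rw [e2]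
            have v2 : dA (List.replicate k c ++ r) (k+i-2) = Fm (fourC c) k * dA r (i-2) := by
              rw [show k + i - 2 = k + (i-2) from by omega]; exact IH (i-2) (by omega) (by omega)
            by_cases hc2 : r.getD i ' ' = r.getD (i-2) ' '
            · conv_lhs => rw [if_pos (show 2 ≤ k + i ∧ r.getD i ' ' = r.getD (i-2) ' ' from
                ⟨by omega, hc2⟩)]
              conv_rhs => rw [if_pos (show 2 ≤ i ∧ r.getD i ' ' = r.getD (i-2) ' ' from
                ⟨h2, hc2⟩)]
              by_cases h3 : 3 ≤ i
              · have e3 : (List.replicate k c ++ r).getD (k+i-3) ' ' = r.getD (i-3) ' ' := by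
                  rw [show k + i - 3 = k + (i-3) from by omega]; exact gadd (i-3)
                rw [e3]
                by_cases hc3 : (r.getD i ' ' = '9' ∨ r.getD i ' ' = '7') ∧
                    r.getD i ' ' = r.getD (i-3) ' '
                · have v3 : dA (List.replicate k c ++ r) (k+i-3) =
                      Fm (fourC c) k * dA r (i-3) := by
                    rw [show k + i - 3 = k + (i-3) from by omega]
                    exact IH (i-3) (by omega) (by omega)
                  conv_lhs => rw [if_pos (show (r.getD i ' ' = '9' ∨ r.getD i ' ' = '7') ∧
                      3 ≤ k + i ∧ r.getD i ' ' = r.getD (i-3) ' ' from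
                    ⟨hc3.1, by omega, hc3.2⟩)]
                  conv_rhs => rw [if_pos (show (r.getD i ' ' = '9' ∨ r.getD i ' ' = '7') ∧
                      3 ≤ i ∧ r.getD i ' ' = r.getD (i-3) ' ' from ⟨hc3.1, h3, hc3.2⟩)]
                  rw [v1, v2, v3, vi]
                  ring
                · conv_lhs => rw [if_neg (show ¬((r.getD i ' ' = '9' ∨ r.getD i ' ' = '7') ∧
                      3 ≤ k + i ∧ r.getD i ' ' = r.getD (i-3) ' ') from by
                    rintro ⟨ha, _, hb⟩; exact hc3 ⟨ha, hb⟩)]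
                  conv_rhs => rw [if_neg (show ¬((r.getD i ' ' = '9' ∨ r.getD i ' ' = '7') ∧
                      3 ≤ i ∧ r.getD i ' ' = r.getD (i-3) ' ') from by
                    rintro ⟨ha, _, hb⟩; exact hc3 ⟨ha, hb⟩)]
                  rw [v1, v2, vi]
                  ring
              · -- i = 2 : the third lookup would cross the boundary, but its guard is false
                have e3 : (List.replicate k c ++ r).getD (k+i-3) ' ' = c := by
                  rw [show k + i - 3 = k - 1 from by omega]; exact glt (k-1) (by omega)
                rw [e3]
                have hni : r.getD i ' ' ≠ c := by
                  rw [hc2, show i - 2 = 0 from by omega]; exact hne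
                conv_lhs => rw [if_neg (show ¬((r.getD i ' ' = '9' ∨ r.getD i ' ' = '7') ∧
                    3 ≤ k + i ∧ r.getD i ' ' = c) from by
                  rintro ⟨_, _, hb⟩; exact hni hb)]
                conv_rhs => rw [if_neg (show ¬((r.getD i ' ' = '9' ∨ r.getD i ' ' = '7') ∧
                    3 ≤ i ∧ r.getD i ' ' = r.getD (i-3) ' ') from by
                  rintro ⟨_, hb, _⟩; omega)]
                rw [v1, v2, vi]
                ring
            · conv_lhs => rw [if_neg (show ¬(2 ≤ k + i ∧ r.getD i ' ' = r.getD (i-2) ' ') from by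
                rintro ⟨_, hb⟩; exact hc2 hb)]
              conv_rhs => rw [if_neg (show ¬(2 ≤ i ∧ r.getD i ' ' = r.getD (i-2) ' ') from by
                rintro ⟨_, hb⟩; exact hc2 hb)]
              rw [v1, vi]
              ring
          · -- i = 1 : the second lookup would cross the boundary, but its guard is false
            have e2 : (List.replicate k c ++ r).getD (k+i-2) ' ' = c := by
              rw [show k + i - 2 = k - 1 from by omega]; exact glt (k-1) (by omega)
            rw [e2]
            have hni : r.getD i ' ' ≠ c := by
              rw [hc1, show i - 1 = 0 from by omega]; exact hne
            conv_lhs => rw [if_neg (show ¬(2 ≤ k + i ∧ r.getD i ' ' = c) from by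
              rintro ⟨_, hb⟩; exact hni hb)]
            conv_rhs => rw [if_neg (show ¬(2 ≤ i ∧ r.getD i ' ' = r.getD (i-2) ' ') from by
              rintro ⟨hb, _⟩; omega)]
            rw [v1, vi]
            ring
        · conv_lhs => rw [if_neg (show ¬(1 ≤ k + i ∧ r.getD i ' ' = r.getD (i-1) ' ') from by
            rintro ⟨_, hb⟩; exact hc1 hb)]
          conv_rhs => rw [if_neg (show ¬(1 ≤ i ∧ r.getD i ' ' = r.getD (i-1) ' ') from by
            rintro ⟨_, hb⟩; exact hc1 hb)]
          rw [vi]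
          ring

-- altSpan decomposes a list into its leading run and the rest
theorem altSpan_decomp (c : Char) (t : List Char) :
    t = List.replicate (altSpan c t).1 c ++ (altSpan c t).2 ∧
    ((altSpan c t).2.getD 0 ' ' ≠ c ∨ (altSpan c t).2 = []) := by
  induction t with
  | nil => simp [altSpan]
  | cons x t ih =>
    by_cases h : x = c
    · subst h
      rw [show altSpan x (x :: t) = ((altSpan x t).1 + 1, (altSpan x t).2) from by
        simp [altSpan]]
      exact ⟨by rw [List.replicate_succ]; exact congrArg (x :: ·) ih.1, ih.2⟩
    · rw [show altSpan c (x :: t) = (0, x :: t) from by simp [altSpan, h]]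
      exact ⟨by simp, Or.inl (by simpa using h)⟩

-- per-run product of tilings (no mod): gP s = exact interpretation count of s
def gP : List Char → Int
  | [] => 1
  | c :: t =>
    let p := altSpan c t
    Fm (fourC c) (p.1 + 1) * gP p.2
termination_by s => s.length
decreasing_by
  have := altSpan_snd_length_le c t
  simp only [List.length_cons]; omega

theorem dA_eq_gP (s : List Char) : dA s s.length = gP s := by
  suffices h : ∀ (n : Nat) (s : List Char), s.length ≤ n → dA s s.length = gP s from
    h s.length s le_rfl
  intro n
  induction n with
  | zero =>
    intro s hs
    have : s = [] := List.length_eq_zero_iff.mp (by omega)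
    subst this
    simp [dA, gP]
  | succ n IH =>
    intro s hs
    match s with
    | [] => simp [dA, gP]
    | (c :: t) =>
      have hd := altSpan_decomp c t
      have hlen := altSpan_snd_length_le c t
      have hdec : c :: t = List.replicate ((altSpan c t).1 + 1) c ++ (altSpan c t).2 := by
        rw [List.replicate_succ]; exact congrArg (c :: ·) hd.1
      have hl : (c :: t).length = ((altSpan c t).1 + 1) + (altSpan c t).2.length := by
        conv_lhs => rw [hdec]
        simp
      rw [hl]
      conv_lhs => rw [hdec]
      rw [C_run c ((altSpan c t).1 + 1) (altSpan c t).2 (by omega) hd.2 _ le_rfl]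
      rw [IH (altSpan c t).2 (by simp at hs; omega)]
      simp only [gP]

-- ===== A side: the array fold computes dA =====

theorem stepA_spec (s : List Char) (dp : List Int) (m : Nat)
    (hlen : dp.length = s.length + 1) (hm : m < s.length)
    (H : ∀ k, k ≤ m → dp.getD k 0 = dA s k) :
    (stepA s dp ((m:Int)+1)).length = s.length + 1 ∧
    ∀ k, k ≤ m + 1 → (stepA s dp ((m:Int)+1)).getD k 0 = dA s k := by
  have hcast : ((m:Int)+1) = ((m+1:Nat):Int) := by push_cast; ring
  simp only [stepA, hcast, PySem.List.pySetD_natCast]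
  constructor
  · simp [hlen]
  · intro k hk
    rcases Nat.lt_or_ge k (m+1) with hkm | hkm
    · rw [List.getD_eq_getElem?_getD, List.getElem?_set_ne (by omega),
          ← List.getD_eq_getElem?_getD, H k (by omega)]
    · have hkeq : k = m + 1 := by omega
      subst hkeq
      rw [List.getD_eq_getElem?_getD, List.getElem?_set_self (by omega)]
      simp only [Option.getD_some]
      have e1 : ((m+1:Nat):Int) - 1 = ((m:Nat):Int) := by push_cast; ring
      rw [e1]
      simp only [PySem.List.pyGetD_natCast]
      rw [dA_succ]
      by_cases h1 : 1 ≤ m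
      · have e2 : ((m+1:Nat):Int) - 2 = ((m-1:Nat):Int) := by omega
        rw [e2]
        simp only [PySem.List.pyGetD_natCast]
        by_cases hc1 : s.getD m ' ' = s.getD (m-1) ' '
        · conv_lhs => rw [if_pos (show (1:Int) < ((m+1:Nat):Int) ∧
              s.getD m ' ' = s.getD (m-1) ' ' from ⟨by omega, hc1⟩)]
          conv_rhs => rw [if_pos (show 1 ≤ m ∧ s.getD m ' ' = s.getD (m-1) ' ' from ⟨h1, hc1⟩)]
          by_cases h2 : 2 ≤ m
          · have e3 : ((m+1:Nat):Int) - 3 = ((m-2:Nat):Int) := by omega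
            rw [e3]
            simp only [PySem.List.pyGetD_natCast]
            by_cases hc2 : s.getD m ' ' = s.getD (m-2) ' '
            · conv_lhs => rw [if_pos (show (2:Int) < ((m+1:Nat):Int) ∧
                  s.getD m ' ' = s.getD (m-2) ' ' from ⟨by omega, hc2⟩)]
              conv_rhs => rw [if_pos (show 2 ≤ m ∧ s.getD m ' ' = s.getD (m-2) ' ' from
                ⟨h2, hc2⟩)]
              by_cases h3 : 3 ≤ m
              · have e4 : ((m+1:Nat):Int) - 4 = ((m-3:Nat):Int) := by omega
                rw [e4]
                simp only [PySem.List.pyGetD_natCast]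
                by_cases hc3 : (s.getD m ' ' = '9' ∨ s.getD m ' ' = '7') ∧
                    s.getD m ' ' = s.getD (m-3) ' '
                · conv_lhs => rw [if_pos (show (s.getD m ' ' = '9' ∨ s.getD m ' ' = '7') ∧
                      (3:Int) < ((m+1:Nat):Int) ∧ s.getD m ' ' = s.getD (m-3) ' ' from
                    ⟨hc3.1, by omega, hc3.2⟩)]
                  conv_rhs => rw [if_pos (show (s.getD m ' ' = '9' ∨ s.getD m ' ' = '7') ∧
                      3 ≤ m ∧ s.getD m ' ' = s.getD (m-3) ' ' from ⟨hc3.1, h3, hc3.2⟩)]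
                  rw [H m (by omega), H (m-1) (by omega), H (m-2) (by omega), H (m-3) (by omega)]
                  ring
                · conv_lhs => rw [if_neg (show ¬((s.getD m ' ' = '9' ∨ s.getD m ' ' = '7') ∧
                      (3:Int) < ((m+1:Nat):Int) ∧ s.getD m ' ' = s.getD (m-3) ' ') from by
                    rintro ⟨ha, _, hb⟩; exact hc3 ⟨ha, hb⟩)]
                  conv_rhs => rw [if_neg (show ¬((s.getD m ' ' = '9' ∨ s.getD m ' ' = '7') ∧
                      3 ≤ m ∧ s.getD m ' ' = s.getD (m-3) ' ') from by
                    rintro ⟨ha, _, hb⟩; exact hc3 ⟨ha, hb⟩)]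
                  rw [H m (by omega), H (m-1) (by omega), H (m-2) (by omega)]
                  ring
              · conv_lhs => rw [if_neg (show ¬((s.getD m ' ' = '9' ∨ s.getD m ' ' = '7') ∧
                    (3:Int) < ((m+1:Nat):Int) ∧
                    s.getD m ' ' = PySem.List.pyGetD s (((m+1:Nat):Int) - 4) ' ') from by
                  rintro ⟨_, hb, _⟩; omega)]
                conv_rhs => rw [if_neg (show ¬((s.getD m ' ' = '9' ∨ s.getD m ' ' = '7') ∧
                    3 ≤ m ∧ s.getD m ' ' = s.getD (m-3) ' ') from by
                  rintro ⟨_, hb, _⟩; omega)]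
                rw [H m (by omega), H (m-1) (by omega), H (m-2) (by omega)]
                ring
            · conv_lhs => rw [if_neg (show ¬((2:Int) < ((m+1:Nat):Int) ∧
                  s.getD m ' ' = s.getD (m-2) ' ') from by rintro ⟨_, hb⟩; exact hc2 hb)]
              conv_rhs => rw [if_neg (show ¬(2 ≤ m ∧ s.getD m ' ' = s.getD (m-2) ' ') from by
                rintro ⟨_, hb⟩; exact hc2 hb)]
              rw [H m (by omega), H (m-1) (by omega)]
              ring
          · conv_lhs => rw [if_neg (show ¬((2:Int) < ((m+1:Nat):Int) ∧
                s.getD m ' ' = PySem.List.pyGetD s (((m+1:Nat):Int) - 3) ' ') from by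
              rintro ⟨hb, _⟩; omega)]
            conv_rhs => rw [if_neg (show ¬(2 ≤ m ∧ s.getD m ' ' = s.getD (m-2) ' ') from by
              rintro ⟨hb, _⟩; omega)]
            rw [H m (by omega), H (m-1) (by omega)]
            ring
        · conv_lhs => rw [if_neg (show ¬((1:Int) < ((m+1:Nat):Int) ∧
              s.getD m ' ' = s.getD (m-1) ' ') from by rintro ⟨_, hb⟩; exact hc1 hb)]
          conv_rhs => rw [if_neg (show ¬(1 ≤ m ∧ s.getD m ' ' = s.getD (m-1) ' ') from by
            rintro ⟨_, hb⟩; exact hc1 hb)]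
          rw [H m (by omega)]
          ring
      · conv_lhs => rw [if_neg (show ¬((1:Int) < ((m+1:Nat):Int) ∧
            s.getD m ' ' = PySem.List.pyGetD s (((m+1:Nat):Int) - 2) ' ') from by
          rintro ⟨hb, _⟩; omega)]
        conv_rhs => rw [if_neg (show ¬(1 ≤ m ∧ s.getD m ' ' = s.getD (m-1) ' ') from by
          rintro ⟨hb, _⟩; omega)]
        rw [H m (by omega)]
        ring

theorem loopA_inv (s : List Char) : ∀ m, m ≤ s.length →
    ((PySem.List.pyRange 1 ((m:Int)+1) 1).foldl (stepA s)
        ((List.replicate (s.length+1) (0:Int)).set 0 1)).length = s.length + 1 ∧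
    ∀ k, k ≤ m →
      ((PySem.List.pyRange 1 ((m:Int)+1) 1).foldl (stepA s)
        ((List.replicate (s.length+1) (0:Int)).set 0 1)).getD k 0 = dA s k := by
  intro m
  induction m with
  | zero =>
    intro _
    rw [PySem.List.pyRange_one_eq_nil (by norm_num)]
    constructor
    · simp
    · intro k hk
      interval_cases k
      rw [List.replicate_succ]
      simp [dA]
  | succ m ih =>
    intro hm
    have ih' := ih (by omega)
    have e : (((m+1:Nat)):Int) + 1 = ((m:Int)+1) + 1 := by push_cast; ring
    rw [e, PySem.List.pyRange_one_succ_right (by omega), List.foldl_append]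
    simp only [List.foldl_cons, List.foldl_nil]
    exact stepA_spec s _ m ih'.1 (by omega) ih'.2

theorem countTexts_eq (A : String) :
    countTexts A = (dA A.toList A.toList.length) % 1000000007 := by
  obtain ⟨hlen, hval⟩ := loopA_inv A.toList A.toList.length le_rfl
  show PySem.Int.mod
      (PySem.List.pyGetD
        ((PySem.List.pyRange 1 ((A.toList.length:Int)+1) 1).foldl (stepA A.toList)
          ((List.replicate (A.toList.length+1) (0:Int)).set 0 1)) (-1) 0) (10^9+7) = _
  set dp := (PySem.List.pyRange 1 ((A.toList.length:Int)+1) 1).foldl (stepA A.toList)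
      ((List.replicate (A.toList.length+1) (0:Int)).set 0 1) with hdp
  have hne : dp ≠ [] := by
    intro h; rw [h] at hlen; simp at hlen
  rw [PySem.Int.mod_eq_emod_of_pos (by norm_num), PySem.List.pyGetD_neg_one dp 0 hne,
      List.getLast_eq_getElem]
  have hidx : dp.length - 1 = A.toList.length := by omega
  have : dp[dp.length - 1]'(by omega) = dp.getD (A.toList.length) 0 := by
    rw [List.getD_eq_getElem (hn := by omega)]
    congr 1
  rw [this, hval A.toList.length le_rfl]
  norm_num

-- ===== B side: altLoop computes gP mod 1000000007 =====

-- state of B's rolling 4-tuple after j steps (0 for indices below the run start)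
def qF (four : Bool) (j : Int) : Int :=
  if j < 0 then 0 else Fm four j.toNat % 1000000007

theorem qF_natCast (four : Bool) (n : Nat) :
    qF four (n:Int) = Fm four n % 1000000007 := by
  simp [qF]

theorem qF_step (four : Bool) (r : Nat) :
    (if four then qF four ((r:Int)-3) + qF four ((r:Int)-2) + qF four ((r:Int)-1) + qF four (r:Int)
     else qF four ((r:Int)-2) + qF four ((r:Int)-1) + qF four (r:Int)) % 1000000007 =
    qF four ((r:Int)+1) := by
  match r with
  | 0 => cases four <;> decide
  | 1 => cases four <;> decide
  | 2 => cases four <;> decide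
  | (n+3) =>
    have e3 : ((n+3:Nat):Int) - 3 = ((n:Nat):Int) := by push_cast; ring
    have e2 : ((n+3:Nat):Int) - 2 = ((n+1:Nat):Int) := by push_cast; ring
    have e1 : ((n+3:Nat):Int) - 1 = ((n+2:Nat):Int) := by push_cast; ring
    have e0 : ((n+3:Nat):Int) + 1 = ((n+4:Nat):Int) := by push_cast; ring
    rw [e3, e2, e1, e0, qF_natCast, qF_natCast, qF_natCast, qF_natCast, qF_natCast]
    rw [show Fm four (n+4) = Fm four (n+3) + Fm four (n+2) + Fm four (n+1) +
        (if four then Fm four n else 0) from by rw [Fm]]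
    cases four <;> simp <;> omega

theorem tile_state (four : Bool) (r : Nat) :
    ((List.range r).foldl
      (fun (st : Int × Int × Int × Int) _ =>
        (st.2.1, st.2.2.1, st.2.2.2,
          PySem.Int.mod (if four then st.1 + st.2.1 + st.2.2.1 + st.2.2.2
                         else st.2.1 + st.2.2.1 + st.2.2.2) (10^9+7)))
      ((0:Int), (0:Int), (0:Int), (1:Int))) =
    (qF four ((r:Int)-3), qF four ((r:Int)-2), qF four ((r:Int)-1), qF four (r:Int)) := by
  induction r with
  | zero =>
    simp only [List.range_zero, List.foldl_nil]
    norm_num [qF, Fm]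
  | succ r ih =>
    rw [List.range_succ, List.foldl_append, ih]
    simp only [List.foldl_cons, List.foldl_nil]
    have e3 : ((r+1:Nat):Int) - 3 = (r:Int) - 2 := by push_cast; ring
    have e2 : ((r+1:Nat):Int) - 2 = (r:Int) - 1 := by push_cast; ring
    have e1 : ((r+1:Nat):Int) - 1 = (r:Int) := by push_cast; ring
    have e0 : ((r+1:Nat):Int) = (r:Int) + 1 := by push_cast; ring
    rw [e3, e2, e1, e0]
    have : PySem.Int.mod
        (if four then qF four ((r:Int)-3) + qF four ((r:Int)-2) + qF four ((r:Int)-1) + qF four (r:Int)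
         else qF four ((r:Int)-2) + qF four ((r:Int)-1) + qF four (r:Int)) (10^9+7) =
        qF four ((r:Int)+1) := by
      rw [PySem.Int.mod_eq_emod_of_pos (by norm_num), show ((10:Int)^9+7) = 1000000007 from by norm_num]
      exact qF_step four r
    rw [this]

theorem altTile_eq (four : Bool) (run : Nat) :
    altTile four run = Fm four run % 1000000007 := by
  show ((List.range run).foldl _ ((0:Int), (0:Int), (0:Int), (1:Int))).2.2.2 = _
  rw [tile_state four run]
  exact qF_natCast four run

theorem modmul (a b m : Int) : (a * (b % m)) % m = (a * b) % m := by
  rw [Int.mul_emod, Int.emod_emod_of_dvd _ dvd_rfl, ← Int.mul_emod]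

theorem modmul3 (a b c m : Int) : (((a * (b % m)) % m) * c) % m = (a * (b * c)) % m := by
  rw [Int.mul_emod ((a * (b % m)) % m) c, Int.emod_emod_of_dvd _ dvd_rfl, ← Int.mul_emod,
      show a * (b % m) * c = (a * c) * (b % m) from by ring, modmul (a*c) b m,
      show a * c * b = a * (b * c) from by ring]

theorem altLoop_eq (s : List Char) (res : Int) :
    altLoop s res = if s = [] then res else (res * gP s) % 1000000007 := by
  suffices h : ∀ (n : Nat) (s : List Char), s.length ≤ n → ∀ res : Int,
      altLoop s res = if s = [] then res else (res * gP s) % 1000000007 from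
    h s.length s le_rfl res
  intro n
  induction n with
  | zero =>
    intro s hs res
    have : s = [] := List.length_eq_zero_iff.mp (by omega)
    subst this
    simp [altLoop]
  | succ n IH =>
    intro s hs res
    match s with
    | [] => simp [altLoop]
    | (c :: t) =>
      have hlen := altSpan_snd_length_le c t
      rw [show altLoop (c :: t) res =
          altLoop (altSpan c t).2
            (PySem.Int.mod (res * altTile (decide (c = '9' ∨ c = '7')) ((altSpan c t).1 + 1))
              (10^9+7)) from by rw [altLoop]]
      rw [IH (altSpan c t).2 (by simp at hs; omega)]
      rw [altTile_eq, PySem.Int.mod_eq_emod_of_pos (by norm_num),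
          show ((10:Int)^9+7) = 1000000007 from by norm_num]
      conv_rhs => rw [if_neg (List.cons_ne_nil c t)]
      conv_rhs => simp only [gP, fourC]
      by_cases h : (altSpan c t).2 = []
      · conv_lhs => rw [if_pos h]
        conv_rhs => rw [h, show gP [] = 1 from by simp [gP], mul_one]
        exact modmul res (Fm (decide (c = '9' ∨ c = '7')) ((altSpan c t).1 + 1)) 1000000007
      · conv_lhs => rw [if_neg h]
        exact modmul3 res (Fm (decide (c = '9' ∨ c = '7')) ((altSpan c t).1 + 1))
          (gP (altSpan c t).2) 1000000007

theorem countTexts_alt_eq (A : String) :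
    countTexts_alt A = (gP A.toList) % 1000000007 := by
  rw [countTexts_alt, altLoop_eq]
  by_cases h : A.toList = []
  · rw [if_pos h, h]
    norm_num [gP]
  · rw [if_neg h, one_mul]

-- ===== VERDICT (by name: the statement is the Claim_ definition above) =====
theorem countTexts_spec : Claim_equal_countTexts := by
  intro A _
  show countTexts A = countTexts_alt A
  rw [countTexts_eq, countTexts_alt_eq, dA_eq_gP]
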